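-- pv_equiv track=rewrite | github.com/beginner0107/algorithm-study | heewon00/구현/PGS level2 72411 메뉴 리뉴얼.py | solution
-- ===== SOURCE A (Python) =====
-- from collections import Counter
-- from itertools import combinations
--
-- def solution(orders, course):
--     result=[]
--
--     for cour in course:
--         if len(sorted(orders, key=len)[-1])<cour:
--             continue
--
--         combi=[]
--         for order in orders:
--             combi.extend(list(combinations(sorted(order),r=cour)))
--
--         order_lst=Counter(combi).most_common() #sort
--         max_order=order_lst[0][1]
--
--         if max_order<2:
--             continue
--
--         for i in range(len(order_lst)):
--             if order_lst[i][1]!=max_order: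
--                 break
--             else:
--                 result.append(''.join(order_lst[i][0]))
--     return sorted(result)
-- ===== SOURCE B (Python) =====
-- from itertools import combinations
--
--
-- def solution(orders, course):
--     plates = [sorted(o) for o in orders]
--     result = []
--     for cour in course:
--         combos = sorted(c for p in plates if cour <= len(p) for c in combinations(p, cour))
--         best, maxrun = [], 0
--         i, n = 0, len(combos)
--         while i < n:
--             j = i
--             while j < n and combos[j] == combos[i]:
--                 j += 1
--             run = j - i
--             if run > maxrun:
--                 maxrun, best = run, [combos[i]]
--             elif run == maxrun:
--                 best.append(combos[i])
--             i = j
--         if maxrun >= 2: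
--             result.extend(''.join(t) for t in best)
--     return sorted(result)
-- ===== Notes on version B (the rewrite author's own statement) =====
-- stated objective: alternative
-- what changed: A counts combinations with a hash Counter, sorts the (key,count) pairs with most_common and walks them breaking at the first count drop, re-sorting all orders by length per course entry for a skip check; B sorts each order once up front, sorts the combination list of each course size and extracts the maximal-count ties in one fused run-length scan (no Counter, no most_common, no longest-order pre-check).
import Mathlib
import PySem

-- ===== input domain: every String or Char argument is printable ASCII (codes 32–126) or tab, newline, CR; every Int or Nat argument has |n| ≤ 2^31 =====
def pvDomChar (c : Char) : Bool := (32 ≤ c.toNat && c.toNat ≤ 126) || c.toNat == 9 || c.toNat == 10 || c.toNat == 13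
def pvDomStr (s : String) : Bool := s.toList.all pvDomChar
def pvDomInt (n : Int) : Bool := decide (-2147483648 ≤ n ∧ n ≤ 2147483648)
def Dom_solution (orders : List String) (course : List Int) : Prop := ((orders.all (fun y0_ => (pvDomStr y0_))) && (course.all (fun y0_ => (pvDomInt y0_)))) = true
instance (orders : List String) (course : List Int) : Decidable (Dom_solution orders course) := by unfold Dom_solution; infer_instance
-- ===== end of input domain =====

-- B replaces A's hash-counting pipeline (Counter, most_common sort, break-at-first-drop, plus a
-- per-course re-sort of orders by length) by sort-then-scan: each order is sorted once up front, the
-- combination list of each course size is sorted and counted by a single run-length scan that tracks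
-- the maximal run and its tied keys online; alternative algorithm, similar cost.


-- ===== PORT A =====
-- sorted(order) on a string
def pvSortChars (o : String) : List Char := PySem.List.sorted o.toList (fun c => c) false

-- A's 'for i in range(len(order_lst)): if count != max: break else: result.append(join)'
def pvTakeMax : List (List Char × Int) → Int → List String → List String
  | [], _, res => res
  | (k, c) :: rest, m, res => if c ≠ m then res else pvTakeMax rest m (res ++ [String.ofList k])

def solution (orders : List String) (course : List Int) : List String :=
  let result := course.foldl (fun result cour =>
    match (PySem.List.sorted orders (fun s => PySem.Str.len s) false).getLast? with
    | none => result        -- Python raises IndexError here (orders = []); excluded by Pre_solution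
    | some longest =>
      if PySem.Str.len longest < cour then result
      else
        -- cour.toNat: combinations(·, r=cour) raises ValueError for cour < 0; excluded by Pre_solution
        let combi := orders.foldl (fun combi order =>
          combi ++ PySem.List.combinations (pvSortChars order) cour.toNat) []
        -- Counter(combi).most_common() = items sorted by count, descending, stable
        let order_lst := PySem.List.sorted (PySem.Dict.counter combi).items (fun kv => kv.2) true
        match order_lst with
        | [] => result      -- Python raises IndexError (order_lst[0]); unreachable under Pre_solution
        | (_, max_order) :: _ =>
          if max_order < 2 then result else pvTakeMax order_lst max_order result) []
  PySem.List.sorted result (fun s => s) false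

-- ===== PORT B =====
-- Source B's fused while loop over the sorted combo list, ported as structural recursion on the
-- remaining suffix: the inner 'while combos[j] == combos[i]' is the takeWhile/dropWhile split
-- (exact: same comparisons, same state (maxrun, best)).
def pvScanRuns : Nat → List (List Char) → Int → List (List Char) → Int × List (List Char)
  | _, [], m, best => (m, best)
  | 0, _ :: _, m, best => (m, best)   -- never reached: fuel starts at the list length and the list shrinks at least as fast
  | fuel + 1, x :: xs, m, best =>
    let run : Int := ((xs.takeWhile (fun y => y == x)).length : Int) + 1
    let rest := xs.dropWhile (fun y => y == x)
    if m < run then pvScanRuns fuel rest run [x]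
    else if run = m then pvScanRuns fuel rest m (best ++ [x])
    else pvScanRuns fuel rest m best

def solution_alt (orders : List String) (course : List Int) : List String :=
  let plates := orders.map pvSortChars
  let result := course.foldl (fun result cour =>
    -- cour.toNat: combinations(p, cour) raises ValueError for cour < 0 (when plates ≠ []); excluded by Pre_solution
    let combos := PySem.List.sorted
      (plates.flatMap (fun p =>
        if cour ≤ (p.length : Int) then PySem.List.combinations p cour.toNat else [])) (fun t => t) false
    let mb := pvScanRuns combos.length combos 0 []
    if 2 ≤ mb.1 then result ++ mb.2.map String.ofList else result) []
  PySem.List.sorted result (fun s => s) false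

-- ===== PRECONDITION & SPEC =====
-- Pre_ excludes exactly the inputs where the Python A raises: an empty `orders` with a non-empty
-- `course` (IndexError on sorted(orders)[-1]) and negative course sizes (ValueError in combinations).
def Pre_solution (orders : List String) (course : List Int) : Prop :=
  (course ≠ [] → orders ≠ []) ∧ ∀ c ∈ course, 0 ≤ c
instance (orders : List String) (course : List Int) : Decidable (Pre_solution orders course) := by unfold Pre_solution; infer_instance
def pvWitness_solution : List String × List Int := (["ab", "ab", "a"], [2, 1])

def Spec_solution (orders : List String) (course : List Int) (out : List String) : Prop := out = solution_alt orders course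
instance (orders : List String) (course : List Int) (out : List String) : Decidable (Spec_solution orders course out) := by unfold Spec_solution; infer_instance

-- ===== CLAIM (what is proved, stated in full; the proofs are below) =====
def Claim_equal_solution : Prop := ∀ (orders : List String) (course : List Int), Dom_solution orders course → Pre_solution orders course → Spec_solution orders course (solution orders course)
-- ===== LEMMAS AND PROOFS =====

-- the two `sorted` instance paths on List Char (core's List.instLT vs Mathlib's LinearOrder) are
-- propositionally equal; bridge so PySem's order lemmas apply to the port's sort of the combo list
lemma pvSortedBridge (xs : List (List Char)) :
    PySem.List.sorted xs (fun t => t) false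
      = @PySem.List.sorted (List Char) (List Char) List.instLinearOrder.toLT
          (@LinearOrder.toDecidableLT _ List.instLinearOrder) xs (fun t => t) false := by
  have h : (fun (a b : List Char) => a.decidableLT b)
      = (@LinearOrder.toDecidableLT _ List.instLinearOrder : DecidableLT (List Char)) := by
    funext a b; exact Subsingleton.elim _ _
  exact congrArg (fun i => @PySem.List.sorted (List Char) (List Char) List.instLT i xs (fun t => t) false) h

-- A's Counter(combi).most_common() for a given course size
def pvOrderLst (orders : List String) (cour : Int) : List (List Char × Int) :=
  PySem.List.sorted (PySem.Dict.counter (orders.foldl (fun combi order =>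
    combi ++ PySem.List.combinations (pvSortChars order) cour.toNat) [])).items (fun kv => kv.2) true

-- A's per-course contribution, as a list
def pvGA (orders : List String) (cour : Int) : List String :=
  match (PySem.List.sorted orders (fun s => PySem.Str.len s) false).getLast? with
  | none => []
  | some longest =>
    if PySem.Str.len longest < cour then []
    else
      match pvOrderLst orders cour with
      | [] => []
      | (_, max_order) :: _ =>
        if max_order < 2 then [] else pvTakeMax (pvOrderLst orders cour) max_order []

-- the combination multiset of a course size, in B's form
def pvCombi (orders : List String) (cour : Int) : List (List Char) :=
  (orders.map pvSortChars).flatMap (fun p => PySem.List.combinations p cour.toNat)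

-- B's per-course contribution, as a list
def pvGB (orders : List String) (cour : Int) : List String :=
  let combos := PySem.List.sorted ((orders.map pvSortChars).flatMap (fun p =>
    if cour ≤ (p.length : Int) then PySem.List.combinations p cour.toNat else [])) (fun t => t) false
  let mb := pvScanRuns combos.length combos 0 []
  if 2 ≤ mb.1 then mb.2.map String.ofList else []

lemma pvTakeMax_eq (l : List (List Char × Int)) (m : Int) (res : List String) :
    pvTakeMax l m res = res ++ (l.takeWhile (fun p => decide (p.2 = m))).map (fun p => String.ofList p.1) := by
  induction l generalizing res with
  | nil => simp [pvTakeMax]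
  | cons p t ih =>
    obtain ⟨k, c⟩ := p
    by_cases h : c = m
    · simp [pvTakeMax, h, ih]
    · simp [pvTakeMax, h]

lemma pvKeyGetLast_ge {α κ : Type} [LinearOrder κ] (key : α → κ) :
    ∀ (l : List α) (h : l ≠ []), l.Pairwise (fun a b => key a ≤ key b) →
      ∀ x ∈ l, key x ≤ key (l.getLast h) := by
  intro l
  induction l with
  | nil => intro h; exact absurd rfl h
  | cons a t ih =>
    intro h hp x hx
    cases t with
    | nil =>
      simp only [List.mem_singleton] at hx
      simp [hx, List.getLast]
    | cons b u =>
      rw [List.getLast_cons (List.cons_ne_nil b u)]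
      rcases List.mem_cons.mp hx with hx | hx
      · subst hx
        exact List.rel_of_pairwise_cons hp (List.getLast_mem (List.cons_ne_nil b u))
      · exact ih (List.cons_ne_nil b u) (List.pairwise_cons.mp hp).2 x hx

lemma pvTakeWhile_eq_filter {α : Type} (key : α → Int) (m : Int) :
    ∀ (l : List α), l.Pairwise (fun a b => key b ≤ key a) → (∀ x ∈ l, key x ≤ m) →
      l.takeWhile (fun x => decide (key x = m)) = l.filter (fun x => decide (key x = m)) := by
  intro l
  induction l with
  | nil => intro _ _; rfl
  | cons a t ih =>
    intro hp hle
    by_cases h : key a = m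
    · rw [List.takeWhile_cons, List.filter_cons]
      simp only [h, decide_true, if_true]
      rw [ih (List.pairwise_cons.mp hp).2 (fun x hx => hle x (List.mem_cons_of_mem _ hx))]
    · rw [List.takeWhile_cons, List.filter_cons]
      simp only [h, decide_false]
      have ha : key a < m := lt_of_le_of_ne (hle a (List.mem_cons_self)) h
      have : t.filter (fun x => decide (key x = m)) = [] := by
        rw [List.filter_eq_nil_iff]
        intro b hb
        have : key b ≤ key a := List.rel_of_pairwise_cons hp hb
        simp only [decide_eq_true_eq]
        omega
      simp [this]

lemma pvPerm_flatMap {α β : Type} (gA gB : α → List β) :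
    ∀ (l : List α), (∀ x ∈ l, (gA x).Perm (gB x)) → (l.flatMap gA).Perm (l.flatMap gB) := by
  intro l
  induction l with
  | nil => intro _; rfl
  | cons a t ih =>
    intro h
    rw [List.flatMap_cons, List.flatMap_cons]
    exact (h a (List.mem_cons_self)).append (ih fun x hx => h x (List.mem_cons_of_mem _ hx))

-- the tail of A's loop body, with the accumulator pulled out
lemma pvStepTail (ol : List (List Char × Int)) (acc : List String) :
    (match ol with
     | [] => acc
     | (_, max_order) :: _ => if max_order < 2 then acc else pvTakeMax ol max_order acc)
      = acc ++ (match ol with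
     | [] => []
     | (_, max_order) :: _ => if max_order < 2 then [] else pvTakeMax ol max_order []) := by
  cases ol with
  | nil => simp
  | cons p t =>
    obtain ⟨k, c⟩ := p
    by_cases h : c < 2
    · simp [h]
    · simp [h, pvTakeMax_eq]

-- A's fold is acc ++ flatMap of per-course contributions
lemma pvFoldA (orders : List String) :
    ∀ (course : List Int) (acc : List String),
      course.foldl (fun result cour =>
        match (PySem.List.sorted orders (fun s => PySem.Str.len s) false).getLast? with
        | none => result
        | some longest =>
          if PySem.Str.len longest < cour then result
          else
            let combi := orders.foldl (fun combi order =>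
              combi ++ PySem.List.combinations (pvSortChars order) cour.toNat) []
            let order_lst := PySem.List.sorted (PySem.Dict.counter combi).items (fun kv => kv.2) true
            match order_lst with
            | [] => result
            | (_, max_order) :: _ =>
              if max_order < 2 then result else pvTakeMax order_lst max_order result) acc
        = acc ++ course.flatMap (pvGA orders) := by
  intro course
  induction course with
  | nil => intro acc; simp
  | cons c t ih =>
    intro acc
    rw [List.foldl_cons, ih, List.flatMap_cons, ← List.append_assoc]
    congr 1
    show _ = acc ++ pvGA orders c
    simp only [pvGA, pvOrderLst]
    cases hl : (PySem.List.sorted orders (fun s => PySem.Str.len s) false).getLast? with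
    | none => simp
    | some longest =>
      dsimp only
      split_ifs with hlt
      · simp
      · exact pvStepTail _ acc

-- B's fold is acc ++ flatMap of per-course contributions
lemma pvFoldB (orders : List String) :
    ∀ (course : List Int) (acc : List String),
      course.foldl (fun result cour =>
        let combos := PySem.List.sorted
          ((orders.map pvSortChars).flatMap (fun p =>
            if cour ≤ (p.length : Int) then PySem.List.combinations p cour.toNat else [])) (fun t => t) false
        let mb := pvScanRuns combos.length combos 0 []
        if 2 ≤ mb.1 then result ++ mb.2.map String.ofList else result) acc
        = acc ++ course.flatMap (pvGB orders) := by
  intro course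
  induction course with
  | nil => intro acc; simp
  | cons c t ih =>
    intro acc
    rw [List.foldl_cons, ih, List.flatMap_cons, ← List.append_assoc]
    congr 1
    show _ = acc ++ pvGB orders c
    simp only [pvGB]
    split_ifs with h
    · rfl
    · simp

-- run-length decomposition of pvScanRuns: the run list of a sorted combo list
def pvRunsF : Nat → List (List Char) → List (List Char × Int)
  | _, [] => []
  | 0, _ :: _ => []
  | fuel + 1, x :: xs =>
    (x, ((xs.takeWhile (fun y => y == x)).length : Int) + 1) :: pvRunsF fuel (xs.dropWhile (fun y => y == x))

-- the max/ties accumulator of pvScanRuns, run list already formed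
def pvScan : List (List Char × Int) → Int → List (List Char) → Int × List (List Char)
  | [], m, best => (m, best)
  | (k, r) :: rest, m, best =>
    if m < r then pvScan rest r [k]
    else if r = m then pvScan rest m (best ++ [k])
    else pvScan rest m best

lemma pvScanRuns_eq_scan :
    ∀ (fuel : Nat) (cs : List (List Char)), cs.length ≤ fuel → ∀ (m : Int) (best : List (List Char)),
      pvScanRuns fuel cs m best = pvScan (pvRunsF fuel cs) m best := by
  intro fuel
  induction fuel with
  | zero =>
    intro cs hcs m best
    cases cs with
    | nil => rfl
    | cons x xs => simp at hcs
  | succ fuel ih =>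
    intro cs hcs m best
    cases cs with
    | nil => rfl
    | cons x xs =>
      have hrest : (xs.dropWhile (fun y => y == x)).length ≤ fuel :=
        le_trans (List.Sublist.length_le (List.dropWhile_sublist _)) (by simpa using hcs)
      simp only [pvScanRuns, pvRunsF, pvScan]
      split_ifs <;> exact ih _ hrest _ _

def pvMaxsnd (rl : List (List Char × Int)) (m : Int) : Int := rl.foldl (fun a p => max a p.2) m

lemma pvMaxsnd_ge : ∀ (rl : List (List Char × Int)) (m : Int), m ≤ pvMaxsnd rl m := by
  intro rl
  induction rl with
  | nil => intro m; simp [pvMaxsnd]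
  | cons p t ih =>
    intro m
    exact le_trans (le_max_left m p.2) (ih (max m p.2))

lemma pvMaxsnd_ub : ∀ (rl : List (List Char × Int)) (m : Int) (p : List Char × Int), p ∈ rl → p.2 ≤ pvMaxsnd rl m := by
  intro rl
  induction rl with
  | nil => intro m p hp; exact absurd hp (List.not_mem_nil)
  | cons q t ih =>
    intro m p hp
    rcases List.mem_cons.mp hp with h | h
    · subst h
      exact le_trans (le_max_right m p.2) (pvMaxsnd_ge t (max m p.2))
    · exact ih (max m q.2) p h

lemma pvMaxsnd_mem : ∀ (rl : List (List Char × Int)) (m : Int),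
    pvMaxsnd rl m = m ∨ ∃ p ∈ rl, pvMaxsnd rl m = p.2 := by
  intro rl
  induction rl with
  | nil => intro m; exact Or.inl rfl
  | cons q t ih =>
    intro m
    have hc : pvMaxsnd (q :: t) m = pvMaxsnd t (max m q.2) := rfl
    rcases ih (max m q.2) with h | ⟨p, hp, hp2⟩
    · by_cases hle : q.2 ≤ m
      · exact Or.inl (by rw [hc, h, max_eq_left hle])
      · exact Or.inr ⟨q, List.mem_cons_self, by rw [hc, h, max_eq_right (by omega)]⟩
    · exact Or.inr ⟨p, List.mem_cons_of_mem _ hp, by rw [hc, hp2]⟩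

lemma pvScan_spec : ∀ (rl : List (List Char × Int)) (m : Int) (best : List (List Char)),
    pvScan rl m best = (pvMaxsnd rl m,
      (if pvMaxsnd rl m = m then best else []) ++
        (rl.filter (fun p => decide (p.2 = pvMaxsnd rl m))).map Prod.fst) := by
  intro rl
  induction rl with
  | nil => intro m best; simp [pvScan, pvMaxsnd]
  | cons q t ih =>
    intro m best
    obtain ⟨k, r⟩ := q
    have hc : pvMaxsnd ((k, r) :: t) m = pvMaxsnd t (max m r) := rfl
    have hge : max m r ≤ pvMaxsnd t (max m r) := pvMaxsnd_ge t (max m r)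
    have hstep : pvScan ((k, r) :: t) m best =
        (if m < r then pvScan t r [k] else if r = m then pvScan t m (best ++ [k]) else pvScan t m best) := rfl
    rw [hc, hstep, List.filter_cons]
    by_cases h1 : m < r
    · have hmr : max m r = r := max_eq_right h1.le
      rw [hmr] at hge ⊢
      rw [if_pos h1, ih r [k]]
      have hne : pvMaxsnd t r ≠ m := by omega
      by_cases h2 : r = pvMaxsnd t r
      · have hd : (decide (((k, r) : List Char × Int).2 = pvMaxsnd t r)) = true := decide_eq_true h2
        rw [hd, if_pos rfl, if_neg hne, if_pos h2.symm]
        simp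
      · have hd : (decide (((k, r) : List Char × Int).2 = pvMaxsnd t r)) = false := decide_eq_false h2
        simp only [hd, Bool.false_eq_true, if_false]
        rw [if_neg hne, if_neg (fun h => h2 h.symm)]
    · by_cases h2 : r = m
      · subst h2
        have hmr : max r r = r := max_self r
        rw [hmr] at hge ⊢
        rw [if_neg h1, if_pos rfl, ih r (best ++ [k])]
        by_cases h3 : pvMaxsnd t r = r
        · have hd : (decide (((k, r) : List Char × Int).2 = pvMaxsnd t r)) = true := decide_eq_true h3.symm
          rw [hd, if_pos rfl, if_pos h3, if_pos h3]
          simp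
        · have hd : (decide (((k, r) : List Char × Int).2 = pvMaxsnd t r)) = false :=
            decide_eq_false (fun h => h3 h.symm)
          simp only [hd, Bool.false_eq_true, if_false]
          rw [if_neg h3, if_neg h3]
      · have hlt : r < m := by omega
        have hmr : max m r = m := max_eq_left hlt.le
        rw [hmr] at hge ⊢
        rw [if_neg h1, if_neg h2, ih m best]
        have hd : (decide (((k, r) : List Char × Int).2 = pvMaxsnd t m)) = false :=
          decide_eq_false (by omega)
        simp only [hd, Bool.false_eq_true, if_false]

-- on a sorted list, everything after the leading block of x differs from x
lemma pvNotMemRest (x : List Char) (xs : List (List Char))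
    (hp : (x :: xs).Pairwise (fun a b => a ≤ b)) :
    ∀ y ∈ xs.dropWhile (fun y => y == x), y ≠ x := by
  intro y hy
  have hne : xs.dropWhile (fun y => y == x) ≠ [] := List.ne_nil_of_mem hy
  obtain ⟨b, t, hbt⟩ := List.exists_cons_of_ne_nil hne
  have hhead : ((xs.dropWhile (fun y => y == x)).head hne == x) = false :=
    List.head_dropWhile_not (fun y => y == x) hne
  have hb : b = (xs.dropWhile (fun y => y == x)).head hne := by
    have h1 : (xs.dropWhile (fun y => y == x)).head? = some b := by rw [hbt]; rfl
    have h2 : (xs.dropWhile (fun y => y == x)).head?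
        = some ((xs.dropWhile (fun y => y == x)).head hne) := List.head?_eq_some_head hne
    rw [h1] at h2
    exact (Option.some_inj.mp h2)
  have hbne : b ≠ x := by
    intro h
    rw [hb] at h
    simp [h] at hhead
  have hsub : (xs.dropWhile (fun y => y == x)).Sublist xs := List.dropWhile_sublist _
  have hbxs : b ∈ xs := List.Sublist.mem (by rw [hbt]; exact List.mem_cons_self) hsub
  have hxb : x ≤ b := (List.pairwise_cons.mp hp).1 b hbxs
  have hlt : x < b := lt_of_le_of_ne hxb (Ne.symm hbne)
  have hprest : (b :: t).Pairwise (fun a b => a ≤ b) := by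
    rw [← hbt]
    exact (List.pairwise_cons.mp hp).2.sublist hsub
  rw [hbt] at hy
  rcases List.mem_cons.mp hy with h | h
  · rw [h]; exact hbne
  · have hby : b ≤ y := List.rel_of_pairwise_cons hprest h
    intro hyx
    rw [hyx] at hby
    exact absurd (lt_of_lt_of_le hlt hby) (lt_irrefl x)

-- the run list of a sorted combo list is its distinct elements paired with their counts
lemma pvRunsF_spec : ∀ (fuel : Nat) (cs : List (List Char)), cs.length ≤ fuel →
    cs.Pairwise (fun a b => a ≤ b) →
    ∃ keys : List (List Char), keys.Nodup ∧ (∀ a, a ∈ keys ↔ a ∈ cs) ∧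
      pvRunsF fuel cs = keys.map (fun k => (k, (cs.count k : Int))) := by
  intro fuel
  induction fuel with
  | zero =>
    intro cs hlen _
    cases cs with
    | nil => exact ⟨[], by simp [pvRunsF]⟩
    | cons x xs => simp at hlen
  | succ fuel ih =>
    intro cs hlen hp
    cases cs with
    | nil => exact ⟨[], by simp [pvRunsF]⟩
    | cons x xs =>
      have hxs : xs = xs.takeWhile (fun y => y == x) ++ xs.dropWhile (fun y => y == x) :=
        (List.takeWhile_append_dropWhile).symm
      have hsame : ∀ y ∈ xs.takeWhile (fun y => y == x), y = x := by
        intro y hy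
        have := List.mem_takeWhile_imp hy
        simpa using this
      have hrest : ∀ y ∈ xs.dropWhile (fun y => y == x), y ≠ x := pvNotMemRest x xs hp
      have hxlen : xs.length ≤ fuel := by
        simp only [List.length_cons] at hlen
        omega
      have hrlen : (xs.dropWhile (fun y => y == x)).length ≤ fuel :=
        le_trans (List.Sublist.length_le (List.dropWhile_sublist _)) hxlen
      have hrp : (xs.dropWhile (fun y => y == x)).Pairwise (fun a b => a ≤ b) :=
        (List.pairwise_cons.mp hp).2.sublist (List.dropWhile_sublist _)
      obtain ⟨keys', hnd, hmem, heq⟩ := ih _ hrlen hrp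
      refine ⟨x :: keys', ?_, ?_, ?_⟩
      · refine List.nodup_cons.mpr ⟨fun hx => ?_, hnd⟩
        exact hrest x ((hmem x).mp hx) rfl
      · intro a
        constructor
        · intro ha
          rcases List.mem_cons.mp ha with h | h
          · rw [h]; exact List.mem_cons_self
          · exact List.mem_cons_of_mem _
              (List.Sublist.mem ((hmem a).mp h) (List.dropWhile_sublist _))
        · intro ha
          rcases List.mem_cons.mp ha with h | h
          · rw [h]; exact List.mem_cons_self
          · rw [hxs] at h
            rcases List.mem_append.mp h with h | h
            · rw [hsame a h]; exact List.mem_cons_self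
            · exact List.mem_cons_of_mem _ ((hmem a).mpr h)
      · have hcx : (x :: xs).count x = (xs.takeWhile (fun y => y == x)).length + 1 := by
          rw [List.count_cons_self]
          congr 1
          conv_lhs => rw [hxs]
          rw [List.count_append]
          have h1 : (xs.takeWhile (fun y => y == x)).count x
              = (xs.takeWhile (fun y => y == x)).length :=
            List.count_eq_length.mpr (fun b hb => by rw [hsame b hb])
          have h2 : (xs.dropWhile (fun y => y == x)).count x = 0 :=
            List.count_eq_zero.mpr (fun hx => hrest x hx rfl)
          omega
        show (x, ((xs.takeWhile (fun y => y == x)).length : Int) + 1) ::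
            pvRunsF fuel (xs.dropWhile (fun y => y == x)) = _
        rw [heq, List.map_cons]
        refine List.cons_eq_cons.mpr ⟨?_, ?_⟩
        · have hv : ((x :: xs).count x : Int)
              = ((xs.takeWhile (fun y => y == x)).length : Int) + 1 := by
            rw [hcx]; push_cast; omega
          rw [hv]
        · refine List.map_congr_left (fun k hk => ?_)
          have hkr : k ∈ xs.dropWhile (fun y => y == x) := (hmem k).mp hk
          have hkx : k ≠ x := hrest k hkr
          have hcount : (x :: xs).count k = (xs.dropWhile (fun y => y == x)).count k := by
            rw [List.count_cons_of_ne (Ne.symm hkx)]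
            conv_lhs => rw [hxs]
            rw [List.count_append]
            have : (xs.takeWhile (fun y => y == x)).count k = 0 :=
              List.count_eq_zero.mpr (fun hkt => hkx (hsame k hkt))
            omega
          rw [hcount]

-- key lists with equal membership and no duplicates give permuting (key, value) tables
lemma pvPairsPerm (k1 k2 : List (List Char)) (f : List Char → Int)
    (h1 : k1.Nodup) (h2 : k2.Nodup) (h : ∀ a, a ∈ k1 ↔ a ∈ k2) :
    (k1.map (fun k => (k, f k))).Perm (k2.map (fun k => (k, f k))) :=
  ((List.perm_ext_iff_of_nodup h1 h2).mpr h).map _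

lemma pvCombi_foldl (orders : List String) (cour : Int) :
    orders.foldl (fun combi order =>
        combi ++ PySem.List.combinations (pvSortChars order) cour.toNat) []
      = pvCombi orders cour := by
  rw [PySem.List.foldl_append_eq_flatMap]
  simp [pvCombi, List.flatMap_map]

-- B's size guard only drops combination lists that are empty anyway
lemma pvFlatGuard (orders : List String) (cour : Int) :
    (orders.map pvSortChars).flatMap (fun p =>
        if cour ≤ (p.length : Int) then PySem.List.combinations p cour.toNat else [])
      = pvCombi orders cour := by
  unfold pvCombi
  refine List.flatMap_congr (fun p _ => ?_)
  by_cases h : cour ≤ (p.length : Int)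
  · rw [if_pos h]
  · rw [if_neg h]
    exact (PySem.List.combinations_eq_nil_of_length_lt _ (by omega)).symm

-- the heart: per-course contributions of A and B are permutations of each other
lemma pvPick_perm (orders : List String) (cour : Int) (hc : 0 ≤ cour) :
    (pvGA orders cour).Perm (pvGB orders cour) := by
  have hcs_perm : (PySem.List.sorted (pvCombi orders cour) (fun t => t) false).Perm (pvCombi orders cour) :=
    PySem.List.sorted_perm (pvCombi orders cour) (fun t => t) false
  have hcs_pair : (PySem.List.sorted (pvCombi orders cour) (fun t => t) false).Pairwise
      (fun a b => a ≤ b) := by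
    rw [pvSortedBridge]
    exact PySem.List.sorted_pairwise (pvCombi orders cour) (fun t => t)
  obtain ⟨keys, hknd, hkmem, hkeq⟩ :=
    pvRunsF_spec (PySem.List.sorted (pvCombi orders cour) (fun t => t) false).length _ le_rfl hcs_pair
  have hkeq' : pvRunsF (PySem.List.sorted (pvCombi orders cour) (fun t => t) false).length
        (PySem.List.sorted (pvCombi orders cour) (fun t => t) false)
      = keys.map (fun k => (k, ((pvCombi orders cour).count k : Int))) := by
    rw [hkeq]
    exact List.map_congr_left (fun k _ => by rw [hcs_perm.count_eq])
  set RL := keys.map (fun k => (k, ((pvCombi orders cour).count k : Int))) with hRL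
  set M := pvMaxsnd RL 0 with hM
  have hGB : pvGB orders cour
      = if 2 ≤ M then ((RL.filter (fun p => decide (p.2 = M))).map Prod.fst).map String.ofList
        else [] := by
    unfold pvGB
    dsimp only
    rw [pvFlatGuard]
    rw [show (pvScanRuns (PySem.List.sorted (pvCombi orders cour) (fun t => t) false).length
        (PySem.List.sorted (pvCombi orders cour) (fun t => t) false) 0 []) = pvScan RL 0 [] from by
      rw [pvScanRuns_eq_scan _ _ le_rfl, hkeq']]
    rw [pvScan_spec]
    have hpre0 : (if pvMaxsnd RL 0 = 0 then ([] : List (List Char)) else []) = [] := by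
      split_ifs <;> rfl
    dsimp only
    rw [hpre0, List.nil_append]
  have hRLval : ∀ p ∈ RL, p.2 = ((pvCombi orders cour).count p.1 : Int) := by
    intro p hp
    obtain ⟨k, _, rfl⟩ := List.mem_map.mp hp
    rfl
  have hRLpos : ∀ p ∈ RL, 1 ≤ p.2 := by
    intro p hp
    obtain ⟨k, hk, rfl⟩ := List.mem_map.mp hp
    have : k ∈ pvCombi orders cour := hcs_perm.mem_iff.mp ((hkmem k).mp hk)
    have := List.count_pos_iff.mpr this
    simp only
    omega
  have hitems : (PySem.Dict.counter (pvCombi orders cour)).items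
      = (PySem.Set.ofList (pvCombi orders cour)).map
          (fun k => (k, ((pvCombi orders cour).count k : Int))) :=
    PySem.Dict.items_counter (pvCombi orders cour)
  have hperm : RL.Perm ((PySem.Dict.counter (pvCombi orders cour)).items) := by
    rw [hitems]
    refine pvPairsPerm _ _ _ hknd (PySem.Set.nodup_ofList _) (fun a => ?_)
    rw [hkmem a, hcs_perm.mem_iff, PySem.Set.mem_ofList]
  by_cases hnil : pvCombi orders cour = []
  · -- no combination of this size exists: both sides contribute nothing
    have hRLnil : RL = [] := by
      rw [hRL]
      have : keys = [] := by
        rw [List.eq_nil_iff_forall_not_mem]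
        intro a ha
        have : a ∈ pvCombi orders cour := hcs_perm.mem_iff.mp ((hkmem a).mp ha)
        rw [hnil] at this
        exact absurd this (List.not_mem_nil)
      rw [this, List.map_nil]
    have hB : pvGB orders cour = [] := by
      rw [hGB, hRLnil]
      simp [hM, hRLnil, pvMaxsnd]
    rw [hB]
    have hA : pvGA orders cour = [] := by
      unfold pvGA
      cases hl : (PySem.List.sorted orders (fun s => PySem.Str.len s) false).getLast? with
      | none => rfl
      | some longest =>
        dsimp only
        split_ifs with hlt
        · rfl
        · have hol : pvOrderLst orders cour = [] := by
            unfold pvOrderLst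
            rw [pvCombi_foldl, hnil]
            rfl
          rw [hol]
    rw [hA]
  · -- the interesting case
    obtain ⟨c0, hc0⟩ := List.exists_mem_of_ne_nil _ hnil
    obtain ⟨p0, hp0, hc0p⟩ := List.mem_flatMap.mp hc0
    obtain ⟨o0, ho0, rfl⟩ := List.mem_map.mp hp0
    have horders : orders ≠ [] := List.ne_nil_of_mem ho0
    have hLne : PySem.List.sorted orders (fun s => PySem.Str.len s) false ≠ [] := by
      rw [Ne, PySem.List.sorted_eq_nil_iff]
      exact horders
    have hlast := List.getLast?_eq_some_getLast hLne
    set longest := (PySem.List.sorted orders (fun s => PySem.Str.len s) false).getLast hLne with hlg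
    have hmax : ∀ o ∈ orders, PySem.Str.len o ≤ PySem.Str.len longest := by
      intro o hoo
      exact pvKeyGetLast_ge (fun s => PySem.Str.len s) _ hLne
        (PySem.List.sorted_pairwise orders _) o ((PySem.List.mem_sorted _ _ _ _).mpr hoo)
    have hlenSort : ∀ o : String, ((pvSortChars o).length : Int) = PySem.Str.len o := by
      intro o
      rw [PySem.Str.len_eq]
      exact_mod_cast (PySem.List.sorted_perm o.toList (fun c => c) false).length_eq
    have hcour : cour ≤ PySem.Str.len longest := by
      have h1 : c0.length = cour.toNat := PySem.List.length_of_mem_combinations hc0p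
      have h2 : c0.Sublist (pvSortChars o0) := PySem.List.sublist_of_mem_combinations hc0p
      have h3 : cour.toNat ≤ (pvSortChars o0).length := h1 ▸ h2.length_le
      have h4 := hlenSort o0
      have h5 := hmax o0 ho0
      omega
    have hIT : (PySem.Dict.counter (pvCombi orders cour)).items ≠ [] := by
      rw [hitems, Ne, List.map_eq_nil_iff]
      intro hn
      have : c0 ∈ PySem.Set.ofList (pvCombi orders cour) := (PySem.Set.mem_ofList _ _).mpr hc0
      rw [hn] at this
      exact absurd this (List.not_mem_nil)
    have holne : pvOrderLst orders cour ≠ [] := by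
      unfold pvOrderLst
      rw [pvCombi_foldl, Ne, PySem.List.sorted_eq_nil_iff]
      exact hIT
    have holeq : pvOrderLst orders cour
        = PySem.List.sorted (PySem.Dict.counter (pvCombi orders cour)).items (fun kv => kv.2) true := by
      unfold pvOrderLst
      rw [pvCombi_foldl]
    cases hol : pvOrderLst orders cour with
    | nil => exact absurd hol holne
    | cons p tl =>
      obtain ⟨k0, m'⟩ := p
      have hge : ∀ y ∈ (PySem.Dict.counter (pvCombi orders cour)).items, y.2 ≤ m' :=
        PySem.List.key_head_sorted_rev_ge _ _ (holeq ▸ hol)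
      have hm'mem : (k0, m') ∈ (PySem.Dict.counter (pvCombi orders cour)).items := by
        have : (k0, m') ∈ pvOrderLst orders cour := by rw [hol]; exact List.mem_cons_self
        rw [holeq] at this
        exact (PySem.List.mem_sorted _ _ _ _).mp this
      have hMub : ∀ p ∈ RL, p.2 ≤ M := fun p hp => pvMaxsnd_ub RL 0 p hp
      have hMm' : M = m' := by
        have h1 : m' ≤ M := hMub (k0, m') (hperm.mem_iff.mpr hm'mem)
        have h2 : M ≤ m' := by
          rcases pvMaxsnd_mem RL 0 with h | ⟨p, hp, hp2⟩
          · -- M = 0, but RL is non-empty with positive values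
            have hRLne : RL ≠ [] := by
              intro hn
              rw [hn] at hperm
              exact hIT (List.Perm.nil_eq hperm).symm
            obtain ⟨q, hq⟩ := List.exists_mem_of_ne_nil _ hRLne
            have := hRLpos q hq
            have := hMub q hq
            rw [← hM] at h
            have h3 := hge (k0, m') hm'mem
            omega
          · rw [← hM] at hp2
            rw [hp2]
            exact hge p (hperm.mem_iff.mp hp)
        omega
      -- align A's shape
      unfold pvGA
      rw [hlast]
      dsimp only
      rw [if_neg (by omega), hol]
      dsimp only
      rw [hGB, hMm']
      by_cases hm2 : m' < 2
      · rw [if_pos hm2, if_neg (by omega)]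
      · rw [if_neg hm2, if_pos (by omega)]
        rw [← hol, pvTakeMax_eq, List.nil_append]
        have hub : ∀ x ∈ pvOrderLst orders cour, x.2 ≤ m' := by
          intro x hx
          rw [holeq] at hx
          exact hge x ((PySem.List.mem_sorted _ _ _ _).mp hx)
        have hpair : (pvOrderLst orders cour).Pairwise (fun a b => b.2 ≤ a.2) := by
          rw [holeq]
          exact PySem.List.sorted_pairwise_rev _ _
        have htf := pvTakeWhile_eq_filter (fun p : List Char × Int => p.2) m'
          (pvOrderLst orders cour) hpair hub
        simp only at htf
        rw [htf]
        have hA : ((pvOrderLst orders cour).filter (fun p => decide (p.2 = m'))).Perm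
            (((PySem.Dict.counter (pvCombi orders cour)).items).filter (fun p => decide (p.2 = m'))) := by
          rw [holeq]
          exact (PySem.List.sorted_perm _ _ _).filter _
        have hB : (RL.filter (fun p => decide (p.2 = m'))).Perm
            (((PySem.Dict.counter (pvCombi orders cour)).items).filter (fun p => decide (p.2 = m'))) :=
          hperm.filter _
        refine ((hA.map (fun p : List Char × Int => String.ofList p.1)).trans ?_)
        have hmB := hB.symm.map (fun p : List Char × Int => String.ofList p.1)
        simpa [List.map_map, Function.comp] using hmB

-- ===== VERDICT (by name: the statement is the Claim_ definition above) =====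
theorem solution_spec : Claim_equal_solution := by
  intro orders course hdom hpre
  unfold Spec_solution
  show solution orders course = solution_alt orders course
  simp only [solution, solution_alt]
  rw [pvFoldA orders course [], pvFoldB orders course [], List.nil_append, List.nil_append]
  rw [PySem.List.sorted_id_eq_sorted_id_iff_perm]
  apply pvPerm_flatMap
  intro cour hc
  exact pvPick_perm orders cour (hpre.2 cour hc)
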